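-- pv_equiv track=rewrite | github.com/dtom90/Algorithms | Arrays/largest-fibonacci-subsequence.py | largest_fib
-- ===== SOURCE A (Python) =====
-- def largest_fib(n, seq):
--
--     fibs = set([0, 1, 2])
--     fib1 = 1
--     fib2 = 2
--
--     fib_seq = []
--     for num in seq:
--         while num > fib2:
--             fib3 = fib1 + fib2
--             fib1 = fib2
--             fib2 = fib3
--             fibs.add(fib2)
--         if num in fibs:
--             fib_seq.append(num)
--
--     return ' '.join([str(j) for j in fib_seq])
-- ===== SOURCE B (Python) =====
-- import math
--
--
-- def is_fib(num):
--     # Gessel's test: m >= 0 is a Fibonacci number iff 5*m^2 + 4 or 5*m^2 - 4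
--     # is a perfect square.
--     if num < 0:
--         return False
--     t = 5 * num * num
--     return math.isqrt(t + 4) ** 2 == t + 4 or math.isqrt(t - 4) ** 2 == t - 4
--
--
-- def largest_fib(n, seq):
--     return ' '.join(str(num) for num in seq if is_fib(num))
-- ===== Notes on version B (the rewrite author's own statement) =====
-- stated objective: alternative
-- what changed: B drops A's Fibonacci generator and growing membership set entirely and instead tests each element independently with Gessel's closed-form criterion (m is Fibonacci iff 5m^2+4 or 5m^2-4 is a perfect square, via math.isqrt).
import Mathlib
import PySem

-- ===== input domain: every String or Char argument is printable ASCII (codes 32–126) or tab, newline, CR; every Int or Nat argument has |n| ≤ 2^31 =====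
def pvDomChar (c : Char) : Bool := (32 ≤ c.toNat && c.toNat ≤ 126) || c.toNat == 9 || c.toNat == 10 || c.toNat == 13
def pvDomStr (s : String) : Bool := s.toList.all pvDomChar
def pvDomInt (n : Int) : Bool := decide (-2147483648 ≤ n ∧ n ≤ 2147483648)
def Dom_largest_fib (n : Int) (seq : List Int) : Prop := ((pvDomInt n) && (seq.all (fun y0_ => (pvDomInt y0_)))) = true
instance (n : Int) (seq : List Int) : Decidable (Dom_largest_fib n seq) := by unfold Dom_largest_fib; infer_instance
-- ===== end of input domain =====

-- B replaces A's Fibonacci generator and growing membership set by an independent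
-- closed-form test per element (Gessel: m is Fibonacci iff 5m^2+4 or 5m^2-4 is a
-- perfect square), checked with an integer square root.

-- ===== PORT A =====
-- the inner 'while num > fib2' loop; the extra '0 < fib1' conjunct is a totality guard only
-- (it holds in every state A reaches: fib1 starts at 1 and only grows)
def largest_fib_while (num fib1 fib2 : Int) (fibs : PySem.Set Int) :
    Int × Int × PySem.Set Int :=
  if h : fib2 < num ∧ 0 < fib1 then
    largest_fib_while num fib2 (fib1 + fib2) (PySem.Set.add fibs (fib1 + fib2))
  else (fib1, fib2, fibs)
termination_by (num - fib2).toNat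
decreasing_by omega

def largest_fib (n : Int) (seq : List Int) : String :=
  PySem.Str.join " "
    ((seq.foldl
      (fun (st : PySem.Set Int × Int × Int × List Int) num =>
        let r := largest_fib_while num st.2.1 st.2.2.1 st.1
        if PySem.Set.contains r.2.2 num then (r.2.2, r.1, r.2.1, st.2.2.2 ++ [num])
        else (r.2.2, r.1, r.2.1, st.2.2.2))
      (PySem.Set.ofList [0, 1, 2], (1 : Int), (2 : Int), ([] : List Int))).2.2.2.map
      PySem.Int.toStr)

-- ===== PORT B =====
-- math.isqrt is ported as Int.sqrt: exact on nonnegative arguments. Source B only reaches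
-- isqrt(t-4) when t+4 is not a perfect square, which forces num >= 1 and hence t-4 >= 1,
-- so isqrt never sees a negative argument in Source B either.
def is_fib_b (num : Int) : Bool :=
  if num < 0 then false
  else
    let t := 5 * num * num
    (Int.sqrt (t + 4) ^ 2 == t + 4) || (Int.sqrt (t - 4) ^ 2 == t - 4)

def largest_fib_alt (n : Int) (seq : List Int) : String :=
  PySem.Str.join " " ((seq.filter is_fib_b).map PySem.Int.toStr)

-- ===== PRECONDITION & SPEC =====
def Spec_largest_fib (n : Int) (seq : List Int) (out : String) : Prop := out = largest_fib_alt n seq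
instance (n : Int) (seq : List Int) (out : String) : Decidable (Spec_largest_fib n seq out) := by unfold Spec_largest_fib; infer_instance

-- ===== CLAIM (what is proved, stated in full; the proofs are below) =====
def Claim_equal_largest_fib : Prop := ∀ (n : Int) (seq : List Int), Dom_largest_fib n seq → Spec_largest_fib n seq (largest_fib n seq)

-- ===== LEMMAS AND PROOFS =====

def IsFib (m : Int) : Prop := ∃ i : Nat, (Nat.fib i : Int) = m

-- any Fibonacci value ≤ fib j is attained at an index ≤ j
lemma fib_le_witness (j : Nat) (m : Int) (hf : IsFib m) (hm : m ≤ (Nat.fib j : Int)) :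
    ∃ i, i ≤ j ∧ (Nat.fib i : Int) = m := by
  obtain ⟨i, hi⟩ := hf
  by_cases hij : i ≤ j
  · exact ⟨i, hij, hi⟩
  · have hmono : Nat.fib j ≤ Nat.fib i := Nat.fib_mono (by omega)
    by_cases h2 : 2 ≤ Nat.fib j
    · have hj3 : 3 ≤ j := by
        by_contra hc
        interval_cases j <;> simp [Nat.fib_zero, Nat.fib_one, Nat.fib_two] at h2
      have hlt : Nat.fib j < Nat.fib i :=
        lt_of_lt_of_le (Nat.fib_lt_fib_succ (by omega)) (Nat.fib_mono (by omega))
      omega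
    · have hcase : Nat.fib j = 0 ∨ Nat.fib j = 1 := by omega
      rcases hcase with h0 | h1
      · refine ⟨0, Nat.zero_le j, ?_⟩
        have f0 : Nat.fib 0 = 0 := by decide
        omega
      · have hj1 : 1 ≤ j := by
          rcases Nat.eq_zero_or_pos j with rfl | h
          · have f0 : Nat.fib 0 = 0 := by decide
            omega
          · exact h
        refine ⟨1, hj1, ?_⟩
        have f1 : Nat.fib 1 = 1 := by decide
        omega

lemma isFib_le_bound {m : Int} {j : Nat} (h : ∃ i, i ≤ j ∧ (Nat.fib i : Int) = m) :
    m ≤ (Nat.fib j : Int) := by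
  obtain ⟨i, hij, hi⟩ := h
  have := Nat.fib_mono hij
  omega

-- invariant for A's loop state
def InvA (fibs : PySem.Set Int) (fib1 fib2 : Int) : Prop :=
  ∃ k : Nat, 2 ≤ k ∧ fib1 = (Nat.fib k : Int) ∧ fib2 = (Nat.fib (k + 1) : Int) ∧
    ∀ m : Int, m ∈ fibs ↔ IsFib m ∧ m ≤ fib2

lemma invA_init : InvA (PySem.Set.ofList [0, 1, 2]) 1 2 := by
  have f0 : Nat.fib 0 = 0 := by decide
  have f1 : Nat.fib 1 = 1 := by decide
  have f2 : Nat.fib 2 = 1 := by decide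
  have f3 : Nat.fib (2 + 1) = 2 := by decide
  have f3' : Nat.fib 3 = 2 := by decide
  refine ⟨2, le_refl 2, by omega, by omega, ?_⟩
  intro m
  rw [PySem.Set.mem_ofList]
  constructor
  · intro hm
    have hm' : m = 0 ∨ m = 1 ∨ m = 2 := by simpa using hm
    rcases hm' with rfl | rfl | rfl
    · exact ⟨⟨0, by omega⟩, by norm_num⟩
    · exact ⟨⟨1, by omega⟩, by norm_num⟩
    · exact ⟨⟨2 + 1, by omega⟩, by norm_num⟩
  · rintro ⟨hf, hle⟩
    obtain ⟨i, hij, hi⟩ := fib_le_witness (2 + 1) m hf (by omega)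
    interval_cases i <;> simp only [f0, f1, f2, f3'] at hi <;> simp <;> omega

lemma while_spec (num fib1 fib2 : Int) (fibs : PySem.Set Int)
    (hinv : InvA fibs fib1 fib2) :
    InvA (largest_fib_while num fib1 fib2 fibs).2.2
         (largest_fib_while num fib1 fib2 fibs).1
         (largest_fib_while num fib1 fib2 fibs).2.1 ∧
    (num ∈ (largest_fib_while num fib1 fib2 fibs).2.2 ↔ IsFib num) := by
  fun_induction largest_fib_while num fib1 fib2 fibs with
  | case1 fib1 fib2 fibs h ih =>
    obtain ⟨k, hk, h1, h2, hmem⟩ := hinv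
    have e : Nat.fib (k + 1 + 1) = Nat.fib k + Nat.fib (k + 1) := Nat.fib_add_two
    apply ih
    refine ⟨k + 1, by omega, h2, by omega, ?_⟩
    intro m
    rw [PySem.Set.mem_add, hmem m]
    constructor
    · rintro (⟨hf, hle⟩ | rfl)
      · exact ⟨hf, by omega⟩
      · exact ⟨⟨k + 1 + 1, by omega⟩, by omega⟩
    · rintro ⟨hf, hle⟩
      obtain ⟨i, hij, hi⟩ := fib_le_witness (k + 1 + 1) m hf (by omega)
      by_cases hik : i ≤ k + 1
      · refine Or.inl ⟨hf, ?_⟩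
        have := isFib_le_bound ⟨i, hik, hi⟩
        omega
      · have hie : i = k + 1 + 1 := by omega
        subst hie
        exact Or.inr (by omega)
  | case2 fib1 fib2 fibs h =>
    obtain ⟨k, hk, h1, h2, hmem⟩ := hinv
    have hpos : 0 < fib1 := by
      have : 0 < Nat.fib k := Nat.fib_pos.mpr (by omega)
      omega
    have hle : num ≤ fib2 := by
      by_contra hc
      exact h ⟨by omega, hpos⟩
    constructor
    · exact ⟨k, hk, h1, h2, hmem⟩
    · show num ∈ fibs ↔ IsFib num
      rw [hmem num]
      exact ⟨fun hx => hx.1, fun hf => ⟨hf, hle⟩⟩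

-- A's fold accumulates exactly the filter by any predicate agreeing with IsFib
lemma foldA_spec (seq : List Int) (p : Int → Bool) :
    ∀ (fibs : PySem.Set Int) (fib1 fib2 : Int) (acc : List Int),
    InvA fibs fib1 fib2 → (∀ x ∈ seq, p x = true ↔ IsFib x) →
    (seq.foldl
      (fun (st : PySem.Set Int × Int × Int × List Int) num =>
        let r := largest_fib_while num st.2.1 st.2.2.1 st.1
        if PySem.Set.contains r.2.2 num then (r.2.2, r.1, r.2.1, st.2.2.2 ++ [num])
        else (r.2.2, r.1, r.2.1, st.2.2.2))
      (fibs, fib1, fib2, acc)).2.2.2 = acc ++ seq.filter p := by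
  induction seq with
  | nil => intro _ _ _ _ _ _; simp
  | cons num t ih =>
    intro fibs fib1 fib2 acc hinv hp
    obtain ⟨hinv', hmem⟩ := while_spec num fib1 fib2 fibs hinv
    have hpn : p num = true ↔ IsFib num := hp num (by simp)
    have hdec : PySem.Set.contains (largest_fib_while num fib1 fib2 fibs).2.2 num = p num := by
      rw [Bool.eq_iff_iff, PySem.Set.contains_iff, hmem]
      exact hpn.symm
    simp only [List.foldl_cons, List.filter_cons]
    rw [hdec]
    by_cases hb : p num = true
    · rw [if_pos hb, if_pos hb,
        ih _ _ _ _ hinv' (fun x hx => hp x (List.mem_cons_of_mem _ hx))]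
      simp
    · rw [if_neg hb, if_neg hb]
      exact ih _ _ _ _ hinv' (fun x hx => hp x (List.mem_cons_of_mem _ hx))

-- ===== B-side: Gessel's criterion =====

-- Lucas numbers
def Luc : Nat → Int
  | 0 => 2
  | 1 => 1
  | m + 2 => Luc m + Luc (m + 1)

-- halving step identities: 2 L(n+1) = L n + 5 F n and 2 F(n+1) = L n + F n
lemma luc_step (m : Nat) :
    2 * Luc (m + 1) = Luc m + 5 * (Nat.fib m : Int) ∧
    2 * ((Nat.fib (m + 1) : Nat) : Int) = Luc m + (Nat.fib m : Int) := by
  induction m using Nat.twoStepInduction with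
  | zero => constructor <;> norm_num [Luc]
  | one => constructor <;> norm_num [Luc]
  | more m ih1 ih2 =>
    obtain ⟨a1, a2⟩ := ih1
    obtain ⟨b1, b2⟩ := ih2
    have e1 : Nat.fib (m + 2) = Nat.fib m + Nat.fib (m + 1) := Nat.fib_add_two
    have e2 : Nat.fib (m + 2 + 1) = Nat.fib (m + 1) + Nat.fib (m + 1 + 1) := Nat.fib_add_two
    have l1 : Luc (m + 2) = Luc m + Luc (m + 1) := rfl
    have l2 : Luc (m + 2 + 1) = Luc (m + 1) + Luc (m + 1 + 1) := rfl
    constructor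
    · rw [l2, l1]; push_cast [e1]; omega
    · rw [l1]; push_cast [e2]; omega

-- the quadratic invariant L n ^ 2 - 5 F n ^ 2 = ±4
lemma luc_quad (m : Nat) :
    Luc m ^ 2 - 5 * ((Nat.fib m : Int)) ^ 2 = 4 * (-1) ^ m := by
  induction m with
  | zero => norm_num [Luc]
  | succ m ih =>
    obtain ⟨h1, h2⟩ := luc_step m
    have key : (2 * Luc (m + 1)) ^ 2 - 5 * (2 * ((Nat.fib (m + 1) : Nat) : Int)) ^ 2 =
        -4 * (Luc m ^ 2 - 5 * ((Nat.fib m : Int)) ^ 2) := by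
      rw [h1, h2]; ring
    have e : (-1 : Int) ^ (m + 1) = -(-1) ^ m := by rw [pow_succ]; ring
    rw [e]
    nlinarith [key, ih]

-- descent: every nonnegative solution of x² - 5y² = ±4 is a (Lucas, Fibonacci) pair
lemma pell (k : Nat) : ∀ (x y : Int), 0 ≤ x → 0 ≤ y → y.toNat ≤ k →
    (x ^ 2 - 5 * y ^ 2 = 4 ∨ x ^ 2 - 5 * y ^ 2 = -4) →
    ∃ m : Nat, Luc m = x ∧ (Nat.fib m : Int) = y := by
  induction k with
  | zero =>
    intro x y hx hy hk h
    have hy0 : y = 0 := by omega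
    subst hy0
    have hx4 : x ^ 2 = 4 := by rcases h with h | h <;> nlinarith [sq_nonneg x]
    have hx2 : x = 2 := by
      have hle : x ≤ 2 := by nlinarith [sq_nonneg (x - 2)]
      have hge : 2 ≤ x := by nlinarith
      omega
    exact ⟨0, by norm_num [Luc, hx2], by norm_num⟩
  | succ k ih =>
    intro x y hx hy hk h
    by_cases hsm : y.toNat ≤ k
    · exact ih x y hx hy hsm h
    by_cases hy1 : y ≤ 1
    · have hy1' : y = 0 ∨ y = 1 := by omega
      rcases hy1' with rfl | rfl
      · have hx4 : x ^ 2 = 4 := by rcases h with h | h <;> nlinarith [sq_nonneg x]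
        have hx2 : x = 2 := by
          have hle : x ≤ 2 := by nlinarith [sq_nonneg (x - 2)]
          have hge : 2 ≤ x := by nlinarith
          omega
        exact ⟨0, by norm_num [Luc, hx2], by norm_num⟩
      · rcases h with h | h
        · have hx9 : x ^ 2 = 9 := by nlinarith
          have hx3 : x = 3 := by
            have hle : x ≤ 3 := by nlinarith [sq_nonneg (x - 3)]
            have hge : 3 ≤ x := by nlinarith
            omega
          exact ⟨2, by norm_num [Luc, hx3], by norm_num⟩
        · have hx1' : x ^ 2 = 1 := by nlinarith
          have hx1 : x = 1 := by
            have hle : x ≤ 1 := by nlinarith [sq_nonneg (x - 1)]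
            have hge : 1 ≤ x := by nlinarith
            omega
          exact ⟨1, by norm_num [Luc, hx1], by norm_num⟩
    -- y ≥ 2: one descent step
    have hy2 : 2 ≤ y := by omega
    -- parity: x and y have the same parity, so (x - y)/2 is exact
    have sqmod : ∀ z : Int, z ^ 2 % 2 = z % 2 := by
      intro z
      rcases Int.even_or_odd z with ⟨a, rfl⟩ | ⟨a, rfl⟩
      · have e : (a + a) ^ 2 = 0 + 2 * (2 * a ^ 2) := by ring
        rw [e, Int.add_mul_emod_self_left]
        omega
      · have e : (2 * a + 1) ^ 2 = 1 + 2 * (2 * a ^ 2 + 2 * a) := by ring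
        rw [e, Int.add_mul_emod_self_left]
        omega
    have k1 := sqmod x
    have k2 := sqmod y
    obtain ⟨u, hu⟩ : ∃ u : Int, x = y + 2 * u := by
      refine ⟨(x - y) / 2, ?_⟩
      generalize x ^ 2 = p at h k1
      generalize y ^ 2 = q at h k2
      rcases h with h | h <;> omega
    -- bounds y < x < 3y
    have hxgt : y < x := by
      rcases h with h | h <;> nlinarith [sq_nonneg (x - y), sq_nonneg (x + y)]
    have hxlt : x < 3 * y := by
      rcases h with h | h <;> nlinarith [sq_nonneg (x - 3 * y), sq_nonneg (x + 3 * y)]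
    have hu1 : 1 ≤ u := by omega
    have huy : u < y := by omega
    -- the descended solution (2y - u, u) with the sign flipped
    have hflip : (2 * y - u) ^ 2 - 5 * u ^ 2 = -(x ^ 2 - 5 * y ^ 2) := by
      rw [hu]; ring
    have h' : (2 * y - u) ^ 2 - 5 * u ^ 2 = 4 ∨ (2 * y - u) ^ 2 - 5 * u ^ 2 = -4 := by
      rcases h with h | h
      · right; omega
      · left; omega
    obtain ⟨m, hL, hF⟩ := ih (2 * y - u) u (by omega) (by omega) (by omega) h'
    obtain ⟨s1, s2⟩ := luc_step m
    rw [hL, hF] at s1 s2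
    exact ⟨m + 1, by omega, by omega⟩

-- B's per-element test decides exactly IsFib
lemma is_fib_b_iff (m : Int) : (is_fib_b m = true) ↔ IsFib m := by
  unfold is_fib_b
  by_cases hm : m < 0
  · rw [if_pos hm]
    simp only [Bool.false_eq_true, false_iff]
    rintro ⟨i, hi⟩
    have : (0 : Int) ≤ (Nat.fib i : Int) := by positivity
    omega
  · rw [if_neg hm]
    simp only [Bool.or_eq_true, beq_iff_eq]
    constructor
    · rintro (hsq | hsq)
      · obtain ⟨i, _, hF⟩ := pell m.toNat (Int.sqrt (5 * m * m + 4)) m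
          (Int.sqrt_nonneg _) (by omega) (le_refl _) (Or.inl (by nlinarith))
        exact ⟨i, hF⟩
      · obtain ⟨i, _, hF⟩ := pell m.toNat (Int.sqrt (5 * m * m - 4)) m
          (Int.sqrt_nonneg _) (by omega) (le_refl _) (Or.inr (by nlinarith))
        exact ⟨i, hF⟩
    · rintro ⟨i, rfl⟩
      have hq := luc_quad i
      rcases Nat.even_or_odd i with hpar | hpar
      · left
        have hsq : 5 * (Nat.fib i : Int) * (Nat.fib i : Int) + 4 = Luc i * Luc i := by
          rw [hpar.neg_one_pow] at hq; nlinarith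
        rw [hsq, Int.sqrt_eq]
        have := Int.natAbs_sq (Luc i)
        nlinarith
      · right
        have hsq : 5 * (Nat.fib i : Int) * (Nat.fib i : Int) - 4 = Luc i * Luc i := by
          rw [hpar.neg_one_pow] at hq; nlinarith
        rw [hsq, Int.sqrt_eq]
        have := Int.natAbs_sq (Luc i)
        nlinarith

-- ===== VERDICT (by name: the statement is the Claim_ definition above) =====
theorem largest_fib_spec : Claim_equal_largest_fib := by
  intro n seq _hdom
  unfold Spec_largest_fib largest_fib largest_fib_alt
  rw [foldA_spec seq is_fib_b _ _ _ _ invA_init (fun x _ => is_fib_b_iff x)]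
  rfl
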